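-- pv_equiv track=rewrite | github.com/OscarTsao/CultureDx | scripts/confusion_analysis.py | error_taxonomy
-- ===== SOURCE A (Python) =====
-- from collections import Counter, defaultdict
--
-- F33_REMAP = {"F33": "F32"}
--
-- def parent(code: str | None) -> str:
--     """Return first 3 characters of an ICD code, or ABSTAIN if None."""
--     if code is None:
--         return "ABSTAIN"
--     return code[:3]
--
-- def normalise_pred(raw: str | None) -> str:
--     """
--     Return parent code for a predicted label.
--     F33 -> F32; None -> ABSTAIN.
--     """
--     p = parent(raw)
--     return F33_REMAP.get(p, p)
--
-- TAXONOMY_RULES = [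
--     ("F41→F32",           lambda g, p: g == "F41" and p in ("F32", "F33")),
--     ("F32→F41",           lambda g, p: g == "F32" and p == "F41"),
--     ("F32→Other",         lambda g, p: g == "F32" and p not in ("F32", "F41", "ABSTAIN")),
--     ("F41→Other",         lambda g, p: g == "F41" and p not in ("F32", "F41", "ABSTAIN")),
--     ("Other→F32",         lambda g, p: g not in ("F32", "F41") and p in ("F32", "F33")),
--     ("Other→F41",         lambda g, p: g not in ("F32", "F41") and p == "F41"),
--     ("Other→Other_wrong", lambda g, p: g not in ("F32", "F41") and
--                                        p not in ("F32", "F33", "F41", "ABSTAIN") and g != p),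
--     ("Abstain",           lambda g, p: p == "ABSTAIN"),
-- ]
--
-- def error_taxonomy(gold_map, pred_map):
--     """
--     Returns (tax_counts, total_errors, n_total) where tax_counts is {label: count}.
--     """
--     tax_counts = Counter()
--     total_errors = 0
--     n_total = len(gold_map)
--
--     for cid, gold_raw in gold_map.items():
--         gold_p = parent(gold_raw)
--         pred_rec = pred_map.get(cid)
--         pred_raw = None if pred_rec is None else pred_rec.get("primary_diagnosis")
--         pred_p = normalise_pred(pred_raw)
--
--         if pred_p == "ABSTAIN":
--             tax_counts["Abstain"] += 1
--             total_errors += 1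
--             continue
--
--         if gold_p == pred_p:
--             # Correct — not an error
--             continue
--
--         # Classify error
--         matched = False
--         for label, rule in TAXONOMY_RULES:
--             if label == "Abstain":
--                 continue
--             if rule(gold_p, pred_p):
--                 tax_counts[label] += 1
--                 matched = True
--                 break
--         if not matched:
--             tax_counts["Other_unclassified"] += 1
--         total_errors += 1
--
--     return tax_counts, total_errors, n_total
-- ===== SOURCE B (Python) =====
-- from collections import Counter
--
-- # (gold category, predicted category) -> taxonomy label; the diagonal F32/F32 and
-- # F41/F41 cells are unreachable (they would mean gold_p == pred_p, handled earlier).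
-- CAT_LABELS = {
--     ("F32", "F41"): "F32→F41",
--     ("F32", "Other"): "F32→Other",
--     ("F41", "F32"): "F41→F32",
--     ("F41", "Other"): "F41→Other",
--     ("Other", "F32"): "Other→F32",
--     ("Other", "F41"): "Other→F41",
--     ("Other", "Other"): "Other→Other_wrong",
-- }
--
-- def _cat(p):
--     return p if p in ("F32", "F41") else "Other"
--
-- def error_taxonomy(gold_map, pred_map):
--     """
--     Returns (tax_counts, total_errors, n_total) where tax_counts is {label: count}.
--     """
--     tax_counts = Counter()
--     total_errors = 0
--     for cid, gold_raw in gold_map.items():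
--         gold_p = gold_raw[:3]
--         rec = pred_map.get(cid)
--         raw = None if rec is None else rec.get("primary_diagnosis")
--         if raw is None:
--             tax_counts["Abstain"] += 1
--             total_errors += 1
--             continue
--         pred_p = raw[:3]
--         if pred_p == "F33":
--             pred_p = "F32"
--         if gold_p == pred_p:
--             continue
--         tax_counts[CAT_LABELS[(_cat(gold_p), _cat(pred_p))]] += 1
--         total_errors += 1
--     return tax_counts, total_errors, len(gold_map)
-- ===== Notes on version B (the rewrite author's own statement) =====
-- stated objective: simpler
-- what changed: B drops A's list of rule lambdas and the inner first-match scan over it (and the unreachable Other_unclassified fallback): each gold/pred parent pair is mapped to its category and the taxonomy label is read from one precomputed (gold_cat, pred_cat) table.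
import Mathlib
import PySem

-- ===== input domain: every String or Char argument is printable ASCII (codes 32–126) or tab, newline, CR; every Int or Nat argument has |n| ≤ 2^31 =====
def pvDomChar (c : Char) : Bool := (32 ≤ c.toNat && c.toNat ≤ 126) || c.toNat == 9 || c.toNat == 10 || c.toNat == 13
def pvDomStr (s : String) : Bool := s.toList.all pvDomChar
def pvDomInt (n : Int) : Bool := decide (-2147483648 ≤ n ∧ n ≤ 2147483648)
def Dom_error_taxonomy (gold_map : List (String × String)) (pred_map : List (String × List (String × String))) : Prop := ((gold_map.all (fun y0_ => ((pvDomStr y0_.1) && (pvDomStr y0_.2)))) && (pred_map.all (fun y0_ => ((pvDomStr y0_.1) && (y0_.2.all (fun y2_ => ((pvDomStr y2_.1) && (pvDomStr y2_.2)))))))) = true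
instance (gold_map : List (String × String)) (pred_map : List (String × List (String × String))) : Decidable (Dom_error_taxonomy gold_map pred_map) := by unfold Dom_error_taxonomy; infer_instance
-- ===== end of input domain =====

-- B replaces A's inner scan over a list of rule lambdas by a direct category table lookup (simpler); same return value, incl. Counter insertion order.

-- ===== PORT A =====
def pyParent (code : Option String) : String :=
  match code with
  | none => "ABSTAIN"
  | some s => PySem.Str.slice s none (some 3)

def F33_REMAP : PySem.Dict String String := PySem.Dict.ofList [("F33", "F32")]

def normalise_pred (raw : Option String) : String :=
  let p := pyParent raw
  F33_REMAP.getD p p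

def TAXONOMY_RULES : List (String × (String → String → Bool)) :=
  [ ("F41→F32", fun g p => g == "F41" && (p == "F32" || p == "F33")),
    ("F32→F41", fun g p => g == "F32" && p == "F41"),
    ("F32→Other", fun g p => g == "F32" && !(p == "F32" || p == "F41" || p == "ABSTAIN")),
    ("F41→Other", fun g p => g == "F41" && !(p == "F32" || p == "F41" || p == "ABSTAIN")),
    ("Other→F32", fun g p => !(g == "F32" || g == "F41") && (p == "F32" || p == "F33")),
    ("Other→F41", fun g p => !(g == "F32" || g == "F41") && p == "F41"),
    ("Other→Other_wrong", fun g p => !(g == "F32" || g == "F41") && !(p == "F32" || p == "F33" || p == "F41" || p == "ABSTAIN") && !(g == p)),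
    ("Abstain", fun _ p => p == "ABSTAIN") ]

-- A's inner 'for label, rule in TAXONOMY_RULES: … break' loop (skipping "Abstain")
def findRule (rules : List (String × (String → String → Bool))) (g p : String) : Option String :=
  match rules with
  | [] => none
  | (label, rule) :: rest =>
    if label == "Abstain" then findRule rest g p
    else if rule g p then some label else findRule rest g p

-- the body of A's outer loop, over state (tax_counts, total_errors)
def stepA (predD : PySem.Dict String (PySem.Dict String String))
    (st : PySem.Dict String Int × Int) (item : String × String) :
    PySem.Dict String Int × Int :=
  let gold_p := pyParent (some item.2)
  let pred_raw : Option String :=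
    match predD.get? item.1 with
    | none => none
    | some d => d.get? "primary_diagnosis"
  let pred_p := normalise_pred pred_raw
  if pred_p == "ABSTAIN" then (st.1.modify "Abstain" 0 (· + 1), st.2 + 1)
  else if gold_p == pred_p then st
  else
    match findRule TAXONOMY_RULES gold_p pred_p with
    | some label => (st.1.modify label 0 (· + 1), st.2 + 1)
    | none => (st.1.modify "Other_unclassified" 0 (· + 1), st.2 + 1)

def error_taxonomy (gold_map : List (String × String)) (pred_map : List (String × List (String × String))) : (List (String × Int)) × Int × Int :=
  let goldD : PySem.Dict String String := PySem.Dict.ofList gold_map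
  let predD : PySem.Dict String (PySem.Dict String String) :=
    PySem.Dict.ofList (pred_map.map (fun kv => (kv.1, PySem.Dict.ofList kv.2)))
  let n_total : Int := goldD.size
  let res := goldD.items.foldl (stepA predD) (PySem.Dict.empty, 0)
  (res.1.items, res.2, n_total)

-- ===== PORT B =====
def catOf (p : String) : String := if p == "F32" || p == "F41" then p else "Other"

def CAT_LABELS : PySem.Dict (String × String) String :=
  PySem.Dict.ofList
    [ (("F32", "F41"), "F32→F41"),
      (("F32", "Other"), "F32→Other"),
      (("F41", "F32"), "F41→F32"),
      (("F41", "Other"), "F41→Other"),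
      (("Other", "F32"), "Other→F32"),
      (("Other", "F41"), "Other→F41"),
      (("Other", "Other"), "Other→Other_wrong") ]

-- the body of B's loop; CAT_LABELS[(…, …)] never misses a key on the reached
-- inputs (proved below), so the total form getD with a dummy default is exact
def stepB (predD : PySem.Dict String (PySem.Dict String String))
    (st : PySem.Dict String Int × Int) (item : String × String) :
    PySem.Dict String Int × Int :=
  let gold_p := PySem.Str.slice item.2 none (some 3)
  let raw? : Option String :=
    match predD.get? item.1 with
    | none => none
    | some d => d.get? "primary_diagnosis"
  match raw? with
  | none => (st.1.modify "Abstain" 0 (· + 1), st.2 + 1)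
  | some raw =>
    let p0 := PySem.Str.slice raw none (some 3)
    let pred_p := if p0 == "F33" then "F32" else p0
    if gold_p == pred_p then st
    else (st.1.modify (CAT_LABELS.getD (catOf gold_p, catOf pred_p) "") 0 (· + 1), st.2 + 1)

def error_taxonomy_alt (gold_map : List (String × String)) (pred_map : List (String × List (String × String))) : (List (String × Int)) × Int × Int :=
  let goldD : PySem.Dict String String := PySem.Dict.ofList gold_map
  let predD : PySem.Dict String (PySem.Dict String String) :=
    PySem.Dict.ofList (pred_map.map (fun kv => (kv.1, PySem.Dict.ofList kv.2)))
  let res := goldD.items.foldl (stepB predD) (PySem.Dict.empty, 0)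
  (res.1.items, res.2, (goldD.size : Int))

-- ===== PRECONDITION & SPEC =====
def Spec_error_taxonomy (gold_map : List (String × String)) (pred_map : List (String × List (String × String))) (out : (List (String × Int)) × Int × Int) : Prop := out = error_taxonomy_alt gold_map pred_map
instance (gold_map : List (String × String)) (pred_map : List (String × List (String × String))) (out : (List (String × Int)) × Int × Int) : Decidable (Spec_error_taxonomy gold_map pred_map out) := by unfold Spec_error_taxonomy; infer_instance

-- ===== CLAIM (what is proved, stated in full; the proofs are below) =====
def Claim_equal_error_taxonomy : Prop := ∀ (gold_map : List (String × String)) (pred_map : List (String × List (String × String))), Dom_error_taxonomy gold_map pred_map → Spec_error_taxonomy gold_map pred_map (error_taxonomy gold_map pred_map)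

-- ===== LEMMAS AND PROOFS =====

theorem classify (g p : String) (hA : p ≠ "ABSTAIN") (h33 : p ≠ "F33") (hne : g ≠ p) :
    findRule TAXONOMY_RULES g p = some (CAT_LABELS.getD (catOf g, catOf p) "") := by
  by_cases hg32 : g = "F32" <;> by_cases hg41 : g = "F41" <;>
    by_cases hp32 : p = "F32" <;> by_cases hp41 : p = "F41" <;>
      simp_all [findRule, TAXONOMY_RULES, catOf, CAT_LABELS] <;> decide

theorem remap_eq (p : String) : F33_REMAP.getD p p = if p == "F33" then "F32" else p := by
  by_cases hp : p = "F33"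
  · subst hp; decide
  · simp [F33_REMAP, PySem.Dict.ofList, PySem.Dict.update, PySem.Dict.getD_eq_get?_getD,
      PySem.Dict.get?_insert_of_ne _ _ hp, hp]

theorem slice3_ne_ABSTAIN (s : String) : PySem.Str.slice s none (some 3) ≠ "ABSTAIN" := by
  intro h
  have h2 := congrArg String.toList h
  simp [PySem.Str.toList_slice, PySem.List.slice_to] at h2
  have h3 : (s.toList.take 3).length ≤ 3 := by simp
  rw [h2] at h3
  simp at h3

theorem step_eq (predD : PySem.Dict String (PySem.Dict String String))
    (st : PySem.Dict String Int × Int) (item : String × String) :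
    stepA predD st item = stepB predD st item := by
  simp only [stepA, stepB, normalise_pred, pyParent]
  cases h1 : predD.get? item.1 with
  | none =>
    simp [remap_eq]
  | some d =>
    cases h2 : d.get? "primary_diagnosis" with
    | none => simp [remap_eq, h2]
    | some raw =>
      simp only [remap_eq, h2]
      set g := PySem.Str.slice item.2 none (some 3) with hg
      set p0 := PySem.Str.slice raw none (some 3) with hp0
      set p := if (p0 == "F33") then "F32" else p0 with hp
      have hA : p ≠ "ABSTAIN" := by
        rw [hp]; split
        · decide
        · exact slice3_ne_ABSTAIN raw
      have h33 : p ≠ "F33" := by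
        rw [hp]; split
        · decide
        · next hcond => simpa using hcond
      have hAb : (p == "ABSTAIN") = false := by simpa using hA
      simp only [hAb, Bool.false_eq_true, if_false]
      by_cases hne : g = p
      · simp [hne]
      · have hne' : (g == p) = false := by simpa using hne
        simp only [hne', Bool.false_eq_true, if_false]
        rw [classify g p hA h33 hne]

theorem stepA_eq_stepB : stepA = stepB :=
  funext fun pd => funext fun st => funext fun it => step_eq pd st it

-- ===== VERDICT (by name: the statement is the Claim_ definition above) =====
theorem error_taxonomy_spec : Claim_equal_error_taxonomy := by
  intro gold_map pred_map _
  unfold Spec_error_taxonomy error_taxonomy error_taxonomy_alt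
  rw [stepA_eq_stepB]
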